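-- pv_equiv track=rewrite | github.com/taylorsmithatnominet/BSidesCBR-2021-Badge | arduino-libs/Pacman/pack_assets.py | bits_per_pixel_for_palette
-- ===== SOURCE A (Python) =====
-- def bits_per_pixel_for_palette(palette):
--     count = len(palette)
--     bits = 0
--     while True:
--         mask = (1 << bits)
--         if (count - 1) < mask:
--             break
--         bits += 1
--     assert bits != 0
--     if bits == 1:
--         return 1
--     if bits <= 2:
--         return 2
--     if bits <= 4:
--         return 4
--     if bits <= 8:
--         return 8
--     raise NotImplementedError
-- ===== SOURCE B (Python) =====
-- def bits_per_pixel_for_palette(palette):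
--     count = len(palette)
--     if count <= 2:
--         return 1
--     if count <= 4:
--         return 2
--     if count <= 16:
--         return 4
--     if count <= 256:
--         return 8
--     raise NotImplementedError
-- ===== Notes on version B (the rewrite author's own statement) =====
-- stated objective: simpler
-- what changed: B drops the bit-by-bit while loop and the bits rounding chain entirely and reads the bit depth straight off the palette size with a threshold chain on count (<=2 -> 1, <=4 -> 2, <=16 -> 4, <=256 -> 8).
-- outside the precondition, e.g. on bits_per_pixel_for_palette([]): A raises AssertionError, B returns 1; on bits_per_pixel_for_palette([0]): A raises AssertionError, B returns 1
-- crash fix: On palettes with fewer than 2 entries A raises AssertionError (bits stays 0); B returns the minimum depth 1. — e.g. on bits_per_pixel_for_palette([]): A raises AssertionError, B returns 1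
import Mathlib
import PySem

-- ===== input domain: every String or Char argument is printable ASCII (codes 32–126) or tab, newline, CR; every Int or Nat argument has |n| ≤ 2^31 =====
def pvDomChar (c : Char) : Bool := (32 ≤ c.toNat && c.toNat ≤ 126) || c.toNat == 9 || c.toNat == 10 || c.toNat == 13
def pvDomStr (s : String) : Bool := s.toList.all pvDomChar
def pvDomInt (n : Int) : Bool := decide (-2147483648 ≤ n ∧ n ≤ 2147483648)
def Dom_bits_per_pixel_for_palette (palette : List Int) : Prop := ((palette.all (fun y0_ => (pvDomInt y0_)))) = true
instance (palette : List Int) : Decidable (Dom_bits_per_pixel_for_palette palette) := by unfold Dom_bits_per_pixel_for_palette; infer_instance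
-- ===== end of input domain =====

-- B replaces A's incremental bit-search loop and rounding chain by a direct
-- threshold chain on the palette size (simpler, same result on 2..256 entries).


-- ===== PORT A =====
-- A's `while True` loop: increment bits until count-1 < 2^bits.  Fuel = count.toNat+1
-- only makes the recursion structural; within Pre_ it never runs out (count ≥ 2, and
-- 2^bits grows past count-1 before bits reaches count).
def pvALoop (count : Int) : Nat → Nat → Nat
  | 0, bits => bits
  | fuel + 1, bits => if count - 1 < (2 : Int) ^ bits then bits else pvALoop count fuel (bits + 1)

def bits_per_pixel_for_palette (palette : List Int) : Int :=
  let count : Int := palette.length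
  let bits := pvALoop count (count.toNat + 1) 0
  -- `assert bits != 0` and the final `raise NotImplementedError` are exceptions:
  -- those inputs are excluded by Pre_; the values returned there are irrelevant.
  if bits = 1 then 1
  else if bits ≤ 2 then 2
  else if bits ≤ 4 then 4
  else if bits ≤ 8 then 8
  else 0

-- ===== PORT B =====
def bits_per_pixel_for_palette_alt (palette : List Int) : Int :=
  let count : Int := palette.length
  if count ≤ 2 then 1
  else if count ≤ 4 then 2
  else if count ≤ 16 then 4
  else if count ≤ 256 then 8
  else 0  -- `raise NotImplementedError`, excluded by Pre_

-- ===== PRECONDITION & SPEC =====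
-- Pre_ excludes palettes with fewer than 2 entries (A's `assert bits != 0` raises
-- AssertionError) and with more than 256 entries (A raises NotImplementedError).
def Pre_bits_per_pixel_for_palette (palette : List Int) : Prop :=
  2 ≤ palette.length ∧ palette.length ≤ 256
instance (palette : List Int) : Decidable (Pre_bits_per_pixel_for_palette palette) := by
  unfold Pre_bits_per_pixel_for_palette; infer_instance

def pvWitness_bits_per_pixel_for_palette : List Int := [0, 1, 2]

-- On palettes with fewer than 2 entries A raises AssertionError (bits stays 0);
-- B returns the minimum depth 1.
def Raises_bits_per_pixel_for_palette (palette : List Int) : Prop := palette.length < 2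
instance (palette : List Int) : Decidable (Raises_bits_per_pixel_for_palette palette) := by
  unfold Raises_bits_per_pixel_for_palette; infer_instance
def pvRaiseWitness_bits_per_pixel_for_palette : List Int := []
def pvRaiseWitnessOut_bits_per_pixel_for_palette : Int := 1

def Spec_bits_per_pixel_for_palette (palette : List Int) (out : Int) : Prop := out = bits_per_pixel_for_palette_alt palette
instance (palette : List Int) (out : Int) : Decidable (Spec_bits_per_pixel_for_palette palette out) := by unfold Spec_bits_per_pixel_for_palette; infer_instance

-- ===== CLAIM (what is proved, stated in full; the proofs are below) =====
def Claim_equal_bits_per_pixel_for_palette : Prop := ∀ (palette : List Int), Dom_bits_per_pixel_for_palette palette → Pre_bits_per_pixel_for_palette palette → Spec_bits_per_pixel_for_palette palette (bits_per_pixel_for_palette palette)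

def Claim_raises_bits_per_pixel_for_palette : Prop := (∀ (palette : List Int), Dom_bits_per_pixel_for_palette palette → Raises_bits_per_pixel_for_palette palette → ¬ Pre_bits_per_pixel_for_palette palette) ∧ (Dom_bits_per_pixel_for_palette (pvRaiseWitness_bits_per_pixel_for_palette) ∧ Raises_bits_per_pixel_for_palette (pvRaiseWitness_bits_per_pixel_for_palette) ∧ bits_per_pixel_for_palette_alt (pvRaiseWitness_bits_per_pixel_for_palette) = pvRaiseWitnessOut_bits_per_pixel_for_palette)

-- ===== LEMMAS AND PROOFS =====

-- Both ports depend on the palette only through its length.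
def pvAOfLen (n : Nat) : Int :=
  let bits := pvALoop (n : Int) (n + 1) 0
  if bits = 1 then 1 else if bits ≤ 2 then 2 else if bits ≤ 4 then 4 else if bits ≤ 8 then 8 else 0

def pvBOfLen (n : Nat) : Int :=
  if (n : Int) ≤ 2 then 1 else if (n : Int) ≤ 4 then 2 else if (n : Int) ≤ 16 then 4 else if (n : Int) ≤ 256 then 8 else 0

lemma pvA_len (palette : List Int) : bits_per_pixel_for_palette palette = pvAOfLen palette.length := rfl

lemma pvB_len (palette : List Int) : bits_per_pixel_for_palette_alt palette = pvBOfLen palette.length := rfl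

set_option maxRecDepth 2000 in
lemma pvKey : ∀ n : Nat, n < 257 → 2 ≤ n → pvAOfLen n = pvBOfLen n := by decide

theorem bits_per_pixel_for_palette_spec : Claim_equal_bits_per_pixel_for_palette := by
  intro palette _ hpre
  obtain ⟨h1, h2⟩ := hpre
  unfold Spec_bits_per_pixel_for_palette
  rw [pvA_len, pvB_len]
  exact pvKey palette.length (by omega) h1

theorem bits_per_pixel_for_palette_raises : Claim_raises_bits_per_pixel_for_palette := by
  unfold Claim_raises_bits_per_pixel_for_palette
  exact ⟨fun palette _ hr hp => by
    unfold Raises_bits_per_pixel_for_palette at hr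
    exact absurd hp.1 (by omega), by decide⟩

-- witness self-check: B's port really returns the stated value on the raise witness
theorem pvRaiseWitness_ok : bits_per_pixel_for_palette_alt pvRaiseWitness_bits_per_pixel_for_palette = pvRaiseWitnessOut_bits_per_pixel_for_palette :=
  bits_per_pixel_for_palette_raises.2.2.2
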